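-- pv_equiv track=rewrite | github.com/Katte-13/pig_english | pig_latin.py | no_consonants
-- ===== SOURCE A (Python) =====
-- def no_consonants(word):
-- # Return the word with a sufix, if the word has no consonants
--
--     consonants = ('b', 'c', 'd', 'f', 'g',
--               'h','j', 'k', 'l', 'm','n',
--               'p','r', 's', 't', 'v', 'x', 'z', 'w')
--
--     for consonant in consonants:
--         if consonant in word:
--             return None
--     pig_latin = word +'aya'
--     return pig_latin
-- ===== SOURCE B (Python) =====
-- def no_consonants(word):
--     # Return the word with a suffix, if the word has no consonants.
--     # Single pass over the word: classify each character directly as a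
--     # consonant (lowercase letter that is not a vowel, 'q' or 'y'),
--     # instead of scanning the word once per consonant.
--     for ch in word:
--         if 'a' <= ch <= 'z' and ch not in 'aeiouqy':
--             return None
--     return word + 'aya'
-- ===== Notes on version B (the rewrite author's own statement) =====
-- stated objective: alternative
-- what changed: B scans the word once, classifying each character arithmetically as a consonant (a lowercase letter outside 'aeiouqy') with early exit, instead of A's loop over a 19-consonant tuple doing one substring scan of the word per consonant.
import Mathlib
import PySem

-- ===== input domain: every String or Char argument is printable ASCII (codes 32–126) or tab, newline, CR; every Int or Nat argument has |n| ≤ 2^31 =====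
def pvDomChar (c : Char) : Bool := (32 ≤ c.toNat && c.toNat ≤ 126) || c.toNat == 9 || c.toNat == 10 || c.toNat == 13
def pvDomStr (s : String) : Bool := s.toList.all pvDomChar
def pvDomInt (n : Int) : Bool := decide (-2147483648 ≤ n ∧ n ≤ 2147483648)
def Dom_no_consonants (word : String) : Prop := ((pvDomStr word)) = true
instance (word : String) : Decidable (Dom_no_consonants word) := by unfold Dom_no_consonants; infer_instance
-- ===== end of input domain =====

-- B scans the word once with early exit, classifying each character directly as a
-- consonant (lowercase letter outside 'aeiouqy'), instead of A's loop over a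
-- 19-consonant tuple doing one substring scan of the word per consonant (alternative).

-- ===== PORT A =====
-- the tuple of 19 one-character strings from A, as characters
def pvConsA : List Char :=
  ['b', 'c', 'd', 'f', 'g', 'h', 'j', 'k', 'l', 'm', 'n',
   'p', 'r', 's', 't', 'v', 'x', 'z', 'w']

-- the 'for consonant in consonants: if consonant in word: return None' loop
def pvConsLoop (cs : List Char) (word : String) : Option String :=
  match cs with
  | [] => some (word ++ "aya")
  | c :: rest => if PySem.Chars.isIn [c] word.toList then none else pvConsLoop rest word

def no_consonants (word : String) : Option String :=
  pvConsLoop pvConsA word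

-- ===== PORT B =====
-- Source B's per-character test: 'a' <= ch <= 'z' and ch not in 'aeiouqy'
-- (Python compares one-character strings; on single ASCII characters this is
-- exactly the Char order, and 'ch not in s' on a single character is Chars.isIn)
def pvIsConsB (c : Char) : Bool :=
  ('a' ≤ c && c ≤ 'z') && !PySem.Chars.isIn [c] "aeiouqy".toList

-- Source B's 'for ch in word: if <consonant>: return None' scan, early exit
def pvScanB (cs : List Char) (word : String) : Option String :=
  match cs with
  | [] => some (word ++ "aya")
  | c :: rest => if pvIsConsB c then none else pvScanB rest word

def no_consonants_alt (word : String) : Option String :=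
  pvScanB word.toList word

-- ===== PRECONDITION & SPEC =====
def Spec_no_consonants (word : String) (out : Option String) : Prop := out = no_consonants_alt word
instance (word : String) (out : Option String) : Decidable (Spec_no_consonants word out) := by unfold Spec_no_consonants; infer_instance

-- ===== CLAIM (what is proved, stated in full; the proofs are below) =====
def Claim_equal_no_consonants : Prop := ∀ (word : String), Dom_no_consonants word → Spec_no_consonants word (no_consonants word)

-- ===== LEMMAS AND PROOFS =====

theorem pv_singleton_infix {c : Char} {l : List Char} : [c] <:+: l ↔ c ∈ l := by
  constructor
  · rintro ⟨p, s, rfl⟩; simp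
  · intro h
    obtain ⟨p, s, rfl⟩ := List.append_of_mem h
    exact ⟨p, s, by simp⟩

-- A's loop returns none iff some consonant of the tuple occurs in the word
theorem pvConsLoop_eq (cs : List Char) (word : String) :
    pvConsLoop cs word =
      if cs.any (fun c => c ∈ word.toList) then none else some (word ++ "aya") := by
  induction cs with
  | nil => simp [pvConsLoop]
  | cons c rest ih =>
    by_cases h : c ∈ word.toList
    · simp [pvConsLoop, PySem.Chars.isIn_iff_infix, pv_singleton_infix, h]
    · simp [pvConsLoop, PySem.Chars.isIn_iff_infix, pv_singleton_infix, h, ih]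

-- B's scan returns none iff some character of the word is classified a consonant
theorem pvScanB_eq (cs : List Char) (word : String) :
    pvScanB cs word = if cs.any pvIsConsB then none else some (word ++ "aya") := by
  induction cs with
  | nil => simp [pvScanB]
  | cons c rest ih =>
    by_cases h : pvIsConsB c
    · simp [pvScanB, h]
    · simp [pvScanB, h, ih]

-- on every ASCII-domain character the two classifications agree (checked code by code)
theorem pv_char_class (c : Char) (h : pvDomChar c = true) :
    pvIsConsB c = decide (c ∈ pvConsA) := by
  have hle : c.toNat ≤ 126 := by
    unfold pvDomChar at h
    simp only [Bool.or_eq_true, Bool.and_eq_true, decide_eq_true_eq, Nat.le_iff_lt_add_one,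
      beq_iff_eq] at h
    omega
  have hall : ∀ n ∈ List.range 127,
      pvIsConsB (Char.ofNat n) = decide (Char.ofNat n ∈ pvConsA) := by
    set_option maxRecDepth 4000 in decide
  have := hall c.toNat (List.mem_range.mpr (by omega))
  rwa [Char.ofNat_toNat] at this

theorem pv_any_eq (word : String) (hd : Dom_no_consonants word) :
    word.toList.any pvIsConsB = pvConsA.any (fun c => c ∈ word.toList) := by
  have hdom : ∀ c ∈ word.toList, pvDomChar c = true := by
    intro c hc
    exact List.all_eq_true.mp hd c hc
  by_cases h : ∃ c ∈ word.toList, c ∈ pvConsA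
  · obtain ⟨c, hw, hc⟩ := h
    have h1 : word.toList.any pvIsConsB = true := by
      refine List.any_eq_true.mpr ⟨c, hw, ?_⟩
      rw [pv_char_class c (hdom c hw)]; simpa using hc
    have h2 : pvConsA.any (fun c => c ∈ word.toList) = true := by
      refine List.any_eq_true.mpr ⟨c, hc, ?_⟩; simpa using hw
    rw [h1, h2]
  · have h1 : word.toList.any pvIsConsB = false := by
      refine List.any_eq_false.mpr fun c hw => ?_
      rw [pv_char_class c (hdom c hw)]
      simpa using fun hc => h ⟨c, hw, hc⟩
    have h2 : pvConsA.any (fun c => c ∈ word.toList) = false := by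
      refine List.any_eq_false.mpr fun c hc => ?_
      simpa using fun hw => h ⟨c, hw, hc⟩
    rw [h1, h2]

-- ===== VERDICT (by name: the statement is the Claim_ definition above) =====
theorem no_consonants_spec : Claim_equal_no_consonants := by
  intro word hd
  unfold Spec_no_consonants no_consonants no_consonants_alt
  rw [pvConsLoop_eq, pvScanB_eq, pv_any_eq word hd]
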